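-- pv_equiv track=rewrite | github.com/equinor/webviz | backend_py/primary/primary/utils/query_string_utils.py | encode_as_uint_list_str
-- ===== SOURCE A (Python) =====
-- def encode_as_uint_list_str(unsigned_int_list: list[int]) -> str:
--     """
--     Encode a list of unsigned integers into a UintListStr formatted string.
--     Single integers are represented as themselves, while consecutive integers are represented as a <start>-<end> range.
--     All entries are separated by "!".
--
--     Note that this encoding does not maintained ordering and does not support duplicates.
--
--     Example: [1, 2, 3, 5, 6, 7, 10] -> "1-3!5-7!10"
--     """
--     if not unsigned_int_list:
--         return ""
--
--     # Remove duplicates and sort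
--     unsigned_int_list = sorted(set(unsigned_int_list))
--
--     # Verify that all integers are unsigned by checking first element in the now sorted list
--     if unsigned_int_list[0] < 0:
--         raise ValueError("List contains negative integers")
--
--     encoded_parts = []
--     start_val = unsigned_int_list[0]
--     end_val = start_val
--
--     for val in unsigned_int_list[1:]:
--         if val == end_val + 1:
--             end_val = val
--         else:
--             if start_val == end_val:
--                 encoded_parts.append(f"{start_val}")
--             else:
--                 encoded_parts.append(f"{start_val}-{end_val}")
--             start_val = val
--             end_val = val
--
--     # Add the last one
--     if start_val == end_val:
--         encoded_parts.append(f"{start_val}")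
--     else:
--         encoded_parts.append(f"{start_val}-{end_val}")
--
--     return "!".join(encoded_parts)
-- ===== SOURCE B (Python) =====
-- def encode_as_uint_list_str(unsigned_int_list: list[int]) -> str:
--     if not unsigned_int_list:
--         return ""
--
--     lst = sorted(set(unsigned_int_list))
--
--     if lst[0] < 0:
--         raise ValueError("List contains negative integers")
--
--     # Compute all run starts and all run ends as two filtered lists over
--     # adjacent pairs, then zip them into (start, end) runs and format.
--     pairs = list(zip(lst, lst[1:]))
--     starts = [lst[0]] + [b for a, b in pairs if b != a + 1]
--     ends = [a for a, b in pairs if b != a + 1] + [lst[-1]]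
--     return "!".join(_format_run(s, e) for s, e in zip(starts, ends))
--
--
-- def _format_run(start, end):
--     return str(start) if start == end else f"{start}-{end}"
-- ===== Notes on version B (the rewrite author's own statement) =====
-- stated objective: alternative
-- what changed: Replaces A's inline start/end state machine with a declarative decomposition: run starts and run ends are computed as two filtered lists over adjacent pairs, zipped into runs, then formatted.
import Mathlib
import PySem

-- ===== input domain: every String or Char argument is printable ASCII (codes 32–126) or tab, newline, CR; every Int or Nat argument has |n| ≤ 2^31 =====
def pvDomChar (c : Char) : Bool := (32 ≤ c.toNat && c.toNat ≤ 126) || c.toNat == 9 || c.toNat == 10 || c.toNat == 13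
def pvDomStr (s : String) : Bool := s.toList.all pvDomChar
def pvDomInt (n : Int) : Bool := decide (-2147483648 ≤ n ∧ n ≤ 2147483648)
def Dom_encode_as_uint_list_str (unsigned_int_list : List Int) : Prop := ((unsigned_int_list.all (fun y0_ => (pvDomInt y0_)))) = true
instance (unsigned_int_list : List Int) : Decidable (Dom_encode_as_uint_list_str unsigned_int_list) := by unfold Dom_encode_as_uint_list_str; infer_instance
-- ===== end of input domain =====

-- B replaces A's inline start/end state machine by computing run starts and run ends as two
-- filtered lists over adjacent pairs, zipping them into runs, then formatting (objective: alternative).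

-- ===== PORT A =====
-- f"{s}" / f"{s}-{e}" for the current run
def pvFmtA (s e : Int) : String :=
  if s = e then PySem.Int.toStr s else PySem.Int.toStr s ++ "-" ++ PySem.Int.toStr e

-- one iteration of A's for-loop: state = (encoded_parts, start_val, end_val)
def pvStepA (st : List String × Int × Int) (v : Int) : List String × Int × Int :=
  if v = st.2.2 + 1 then (st.1, st.2.1, v)
  else (st.1 ++ [pvFmtA st.2.1 st.2.2], v, v)

def encode_as_uint_list_str (unsigned_int_list : List Int) : String :=
  if unsigned_int_list = [] then ""
  else
    -- sorted(set(unsigned_int_list))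
    let lst := PySem.List.sorted (PySem.Set.ofList unsigned_int_list) (fun x => x) false
    -- A's `if lst[0] < 0: raise ValueError` is excluded by Pre_encode_as_uint_list_str
    match lst with
    | [] => ""  -- unreachable: lst is a permutation of the non-empty dedup list
    | x :: _ =>
      let st := (PySem.List.slice lst (some 1) none).foldl pvStepA ([], x, x)
      PySem.Str.join "!" (st.1 ++ [pvFmtA st.2.1 st.2.2])

-- ===== PORT B =====
def pvFmtB (s e : Int) : String :=
  if s = e then PySem.Int.toStr s else PySem.Int.toStr s ++ "-" ++ PySem.Int.toStr e

def encode_as_uint_list_str_alt (unsigned_int_list : List Int) : String :=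
  if unsigned_int_list = [] then ""
  else
    let lst := PySem.List.sorted (PySem.Set.ofList unsigned_int_list) (fun x => x) false
    -- B's `if lst[0] < 0: raise ValueError` is excluded by Pre_encode_as_uint_list_str
    -- pairs = list(zip(lst, lst[1:]))
    let pairs := lst.zip (PySem.List.slice lst (some 1) none)
    -- starts = [lst[0]] + [b for a, b in pairs if b != a + 1]
    let starts := [PySem.List.pyGetD lst 0 0] ++ (pairs.filter (fun ab => ab.2 != ab.1 + 1)).map (fun ab => ab.2)
    -- ends = [a for a, b in pairs if b != a + 1] + [lst[-1]]
    let ends := (pairs.filter (fun ab => ab.2 != ab.1 + 1)).map (fun ab => ab.1) ++ [PySem.List.pyGetD lst (-1) 0]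
    PySem.Str.join "!" ((starts.zip ends).map (fun se => pvFmtB se.1 se.2))

-- ===== PRECONDITION & SPEC =====
-- Pre_ excludes exactly the inputs containing a negative integer, on which A raises ValueError.
def Pre_encode_as_uint_list_str (unsigned_int_list : List Int) : Prop :=
  ∀ x ∈ unsigned_int_list, 0 ≤ x
instance (unsigned_int_list : List Int) : Decidable (Pre_encode_as_uint_list_str unsigned_int_list) := by
  unfold Pre_encode_as_uint_list_str; infer_instance
def pvWitness_encode_as_uint_list_str : List Int := [1, 2, 3, 5, 6, 7, 10]

def Spec_encode_as_uint_list_str (unsigned_int_list : List Int) (out : String) : Prop :=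
  out = encode_as_uint_list_str_alt unsigned_int_list
instance (unsigned_int_list : List Int) (out : String) : Decidable (Spec_encode_as_uint_list_str unsigned_int_list out) := by
  unfold Spec_encode_as_uint_list_str; infer_instance

-- ===== CLAIM (what is proved, stated in full; the proofs are below) =====
def Claim_equal_encode_as_uint_list_str : Prop := ∀ (unsigned_int_list : List Int), Dom_encode_as_uint_list_str unsigned_int_list → Pre_encode_as_uint_list_str unsigned_int_list → Spec_encode_as_uint_list_str unsigned_int_list (encode_as_uint_list_str unsigned_int_list)

-- ===== LEMMAS AND PROOFS =====

-- the list of (start, end) maximal consecutive runs, given the current run (s, e)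
def pvRuns (s e : Int) : List Int → List (Int × Int)
  | [] => [(s, e)]
  | v :: vs => if v = e + 1 then pvRuns s v vs else (s, e) :: pvRuns v v vs

-- A's fold emits exactly the formatted runs
theorem pvFoldA_runs (xs : List Int) : ∀ (parts : List String) (s e : Int),
    (xs.foldl pvStepA (parts, s, e)).1 ++ [pvFmtA (xs.foldl pvStepA (parts, s, e)).2.1 (xs.foldl pvStepA (parts, s, e)).2.2]
      = parts ++ (pvRuns s e xs).map (fun r => pvFmtA r.1 r.2) := by
  induction xs with
  | nil => intro parts s e; simp [pvRuns]
  | cons v vs ih =>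
    intro parts s e
    by_cases h : v = e + 1
    · simp [List.foldl_cons, pvStepA, h, pvRuns, ih]
    · simp [List.foldl_cons, pvStepA, h, pvRuns, ih]

-- the head of pvRuns starts at s, and the start only affects that head
theorem pvRuns_decomp (xs : List Int) : ∀ (e : Int),
    ∃ e' t, ∀ s, pvRuns s e xs = (s, e') :: t := by
  induction xs with
  | nil => intro e; exact ⟨e, [], fun s => rfl⟩
  | cons v vs ih =>
    intro e
    by_cases h : v = e + 1
    · subst h
      obtain ⟨e', t, ht⟩ := ih (e + 1)
      exact ⟨e', t, fun s => by simp [pvRuns, ht]⟩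
    · exact ⟨e, pvRuns v v vs, fun s => by simp [pvRuns, h]⟩

-- B's zip of starts and ends is exactly the run list
theorem pvZip_runs (rest : List Int) : ∀ (x : Int),
    ((x :: ((((x :: rest).zip rest).filter (fun ab => ab.2 != ab.1 + 1)).map (fun ab => ab.2))).zip
      (((((x :: rest).zip rest).filter (fun ab => ab.2 != ab.1 + 1)).map (fun ab => ab.1)) ++ [(x :: rest).getLast (by simp)]))
      = pvRuns x x rest := by
  induction rest with
  | nil => intro x; simp [pvRuns]
  | cons y ys ih =>
    intro x
    have hlast : (x :: y :: ys).getLast (by simp) = (y :: ys).getLast (by simp) :=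
      List.getLast_cons (by simp)
    by_cases h : y = x + 1
    · -- the pair (x, y) is filtered out
      subst h
      have hfilt : ((x :: (x + 1) :: ys).zip ((x + 1) :: ys)).filter (fun ab => ab.2 != ab.1 + 1)
          = (((x + 1) :: ys).zip ys).filter (fun ab => ab.2 != ab.1 + 1) := by
        simp [List.zip_cons_cons]
      obtain ⟨e', t, ht⟩ := pvRuns_decomp ys (x + 1)
      have ihy := ih (x + 1)
      rw [ht (x + 1)] at ihy
      -- split the ends list of the IH into head and tail
      rcases hE : (((((x + 1) :: ys).zip ys).filter (fun ab => ab.2 != ab.1 + 1)).map (fun ab => ab.1))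
          ++ [((x + 1) :: ys).getLast (by simp)] with _ | ⟨c, r⟩
      · exact absurd hE (by simp)
      · rw [hE] at ihy
        simp only [List.zip_cons_cons, List.cons.injEq, Prod.mk.injEq] at ihy
        obtain ⟨⟨_, hc⟩, hzip⟩ := ihy
        rw [hfilt, hlast, hE]
        simp only [List.zip_cons_cons, hzip, hc]
        have hx := ht x
        simp only [pvRuns, if_true]
        exact hx.symm
    · -- the pair (x, y) is kept
      have hfilt : ((x :: y :: ys).zip (y :: ys)).filter (fun ab => ab.2 != ab.1 + 1)
          = (x, y) :: (((y :: ys).zip ys).filter (fun ab => ab.2 != ab.1 + 1)) := by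
        simp [List.zip_cons_cons, h]
      rw [hfilt, hlast]
      simp only [List.map_cons, List.cons_append, List.zip_cons_cons]
      rw [ih y]
      simp [pvRuns, h]

-- sorted(set(l)) of a non-empty l is non-empty
theorem pvSorted_ne_nil (l : List Int) (h : l ≠ []) :
    PySem.List.sorted (PySem.Set.ofList l) (fun x => x) false ≠ [] := by
  intro hnil
  rw [PySem.List.sorted_eq_nil_iff] at hnil
  rcases l with _ | ⟨a, l'⟩
  · exact h rfl
  · have : a ∈ PySem.Set.ofList (a :: l') := by
      rw [PySem.Set.mem_ofList]; exact List.mem_cons_self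
    rw [hnil] at this
    exact absurd this (List.not_mem_nil)

-- ===== VERDICT (by name: the statement is the Claim_ definition above) =====
theorem encode_as_uint_list_str_spec : Claim_equal_encode_as_uint_list_str := by
  intro l _ _
  unfold Spec_encode_as_uint_list_str encode_as_uint_list_str encode_as_uint_list_str_alt
  by_cases hl : l = []
  · simp [hl]
  · simp only [hl, if_false]
    rcases hlst : PySem.List.sorted (PySem.Set.ofList l) (fun x => x) false with _ | ⟨x, rest⟩
    · exact absurd hlst (pvSorted_ne_nil l hl)
    · simp only [PySem.List.slice_from_one, List.tail_cons,
        PySem.List.pyGetD_zero_cons]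
      have hget : PySem.List.pyGetD (x :: rest) (-1) (0 : Int) = (x :: rest).getLast (by simp) :=
        PySem.List.pyGetD_neg_one (x :: rest) 0 (by simp)
      rw [hget, pvFoldA_runs]
      simp only [List.singleton_append]
      rw [pvZip_runs]
      simp [pvFmtA, pvFmtB]
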